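-- pv_equiv track=rewrite | github.com/pbcoyle123/SAB-EarningCalls | embedding_analysis/embedding_analysis.py | _get_adjacent_quarters
-- ===== SOURCE A (Python) =====
-- from typing import Dict, List, Tuple, Optional, Set
--
-- def _get_adjacent_quarters(year: str, quarter: str, window: int = 2) -> List[Tuple[str, str]]:
--     """
--     Get quarters within ±window of given quarter."""
--     # parse quarter number
--     q_num = int(quarter.replace('Q', '').replace('q', ''))
--     year_int = int(year)
--
--     quarters = []
--
--     for offset in range(-window, window + 1):
--         # calculate target quarter and year
--         total_quarters = (year_int * 4 + q_num - 1) + offset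
--         new_year = total_quarters // 4
--         new_q = (total_quarters % 4) + 1
--
--         quarters.append((str(new_year), f"Q{new_q}"))
--
--     return quarters
-- ===== SOURCE B (Python) =====
-- def _get_adjacent_quarters(year: str, quarter: str, window: int = 2):
--     """Get quarters within ±window of given quarter, grouped year by year:
--     iterate over the covered calendar years and take each year's quarters as a
--     slice of a static label table, instead of a per-offset div/mod computation."""
--     q_num = int(quarter.replace('Q', '').replace('q', ''))
--     start = int(year) * 4 + q_num - 1 - window   # first absolute quarter index
--     stop = start + 2 * window + 1                # one past the last
--     labels = ["Q1", "Q2", "Q3", "Q4"]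
--     quarters = []
--     for yy in range(start // 4, (stop + 3) // 4):
--         lo = max(start - yy * 4, 0)
--         quarters.extend((str(yy), lab) for lab in labels[lo:stop - yy * 4])
--     return quarters
-- ===== Notes on version B (the rewrite author's own statement) =====
-- stated objective: alternative
-- what changed: B groups the window by calendar year: it iterates over the covered years and takes each year's quarters as a clamped slice of a static ["Q1","Q2","Q3","Q4"] label table, doing division only at the year boundaries, instead of A's flat loop over offsets recomputing total_quarters and a floordiv/mod pair per emitted element.
import Mathlib
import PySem

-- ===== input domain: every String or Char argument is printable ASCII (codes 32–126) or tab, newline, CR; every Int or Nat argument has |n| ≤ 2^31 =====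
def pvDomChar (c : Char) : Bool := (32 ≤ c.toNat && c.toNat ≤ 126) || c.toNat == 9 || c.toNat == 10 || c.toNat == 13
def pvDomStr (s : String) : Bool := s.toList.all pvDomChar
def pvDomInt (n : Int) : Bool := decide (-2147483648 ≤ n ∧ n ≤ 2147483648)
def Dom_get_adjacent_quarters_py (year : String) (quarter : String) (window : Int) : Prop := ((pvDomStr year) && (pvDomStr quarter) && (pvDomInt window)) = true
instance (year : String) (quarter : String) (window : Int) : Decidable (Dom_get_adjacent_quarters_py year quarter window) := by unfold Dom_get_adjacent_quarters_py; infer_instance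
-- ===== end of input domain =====

-- B groups the window by calendar year, slicing a static quarter-label table per year,
-- instead of A's flat per-offset div/mod loop (objective: alternative; same O(window) cost).

-- ===== PORT A =====
def get_adjacent_quarters_py (year : String) (quarter : String) (window : Int) : List (String × String) :=
  match PySem.Int.ofStr? (PySem.Str.replace (PySem.Str.replace quarter "Q" "") "q" ""),
        PySem.Int.ofStr? year with
  | some q_num, some year_int =>
    (PySem.List.pyRange (-window) (window + 1) 1).foldl
      (fun quarters offset =>
        let total_quarters := (year_int * 4 + q_num - 1) + offset
        let new_year := PySem.Int.floordiv total_quarters 4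
        let new_q := PySem.Int.mod total_quarters 4 + 1
        quarters ++ [(PySem.Int.toStr new_year, "Q" ++ PySem.Int.toStr new_q)]) []
  | _, _ => []  -- int() raises ValueError: excluded by Pre_

-- ===== PORT B =====
def pvLabels : List String := ["Q1", "Q2", "Q3", "Q4"]

def get_adjacent_quarters_py_alt (year : String) (quarter : String) (window : Int) : List (String × String) :=
  match PySem.Int.ofStr? (PySem.Str.replace (PySem.Str.replace quarter "Q" "") "q" "") with
  | none => []  -- int() raises ValueError: excluded by Pre_
  | some q_num =>
    match PySem.Int.ofStr? year with
    | none => []  -- int() raises ValueError: excluded by Pre_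
    | some year_int =>
      let start := year_int * 4 + q_num - 1 - window
      let stop := start + 2 * window + 1
      (PySem.List.pyRange (PySem.Int.floordiv start 4) (PySem.Int.floordiv (stop + 3) 4) 1).foldl
        (fun quarters yy =>
          let lo := max (start - yy * 4) 0
          quarters ++ (PySem.List.slice pvLabels (some lo) (some (stop - yy * 4))).map
              (fun lab => (PySem.Int.toStr yy, lab))) []

-- ===== PRECONDITION & SPEC =====
-- Pre_: both int() parses succeed (otherwise Python A raises ValueError)
def Pre_get_adjacent_quarters_py (year : String) (quarter : String) (window : Int) : Prop :=
  (PySem.Int.ofStr? (PySem.Str.replace (PySem.Str.replace quarter "Q" "") "q" "")).isSome = true ∧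
  (PySem.Int.ofStr? year).isSome = true
instance (year : String) (quarter : String) (window : Int) : Decidable (Pre_get_adjacent_quarters_py year quarter window) := by unfold Pre_get_adjacent_quarters_py; infer_instance

def pvWitness_get_adjacent_quarters_py : String × String × Int := ("2023", "Q4", 2)

def Spec_get_adjacent_quarters_py (year : String) (quarter : String) (window : Int) (out : List (String × String)) : Prop := out = get_adjacent_quarters_py_alt year quarter window
instance (year : String) (quarter : String) (window : Int) (out : List (String × String)) : Decidable (Spec_get_adjacent_quarters_py year quarter window out) := by unfold Spec_get_adjacent_quarters_py; infer_instance

-- ===== CLAIM (what is proved, stated in full; the proofs are below) =====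
def Claim_equal_get_adjacent_quarters_py : Prop := ∀ (year : String) (quarter : String) (window : Int), Dom_get_adjacent_quarters_py year quarter window → Pre_get_adjacent_quarters_py year quarter window → Spec_get_adjacent_quarters_py year quarter window (get_adjacent_quarters_py year quarter window)

-- ===== LEMMAS AND PROOFS =====

-- the item A emits for absolute quarter index t
def pvF (t : Int) : String × String :=
  (PySem.Int.toStr (PySem.Int.floordiv t 4), "Q" ++ PySem.Int.toStr (PySem.Int.mod t 4 + 1))

-- A's foldl is a map of pvF over the absolute quarter indices
lemma pvA_eq_map (base w : Int) :
    (PySem.List.pyRange (-w) (w + 1) 1).foldl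
      (fun quarters offset =>
        quarters ++ [(PySem.Int.toStr (PySem.Int.floordiv (base + offset) 4),
                      "Q" ++ PySem.Int.toStr (PySem.Int.mod (base + offset) 4 + 1))]) []
      = (List.range (2 * w + 1).toNat).map (fun k : Nat => pvF (base - w + (k : Int))) := by
  rw [PySem.List.foldl_append_singleton_eq_map]
  apply List.ext_getElem
  · simp [PySem.List.length_pyRange_one]; omega
  · intro i h1 h2
    simp only [List.nil_append, List.getElem_map, List.getElem_range]
    rw [PySem.List.getElem_pyRange_one]
    have h : base + (-w + (i : Int)) = base - w + (i : Int) := by ring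
    rw [h]; rfl

-- B's year block (the loop body's extension), as a function of start s, stop e, year yy
def pvBlk (s e yy : Int) : List (String × String) :=
  (PySem.List.slice pvLabels (some (max (s - yy * 4) 0)) (some (e - yy * 4))).map
    (fun lab => (PySem.Int.toStr yy, lab))

-- B's whole loop as a flatMap over the covered years
def pvFlat (s e : Int) : List (String × String) :=
  (PySem.List.pyRange (PySem.Int.floordiv s 4) (PySem.Int.floordiv (e + 3) 4) 1).flatMap (pvBlk s e)

-- a block whose slice is empty
lemma pvBlk_nil (s e yy : Int) (h0 : 0 ≤ e - yy * 4) (h : e - yy * 4 ≤ max (s - yy * 4) 0) :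
    pvBlk s e yy = [] := by
  unfold pvBlk
  rw [PySem.List.slice_toNat _ (le_max_right _ _) h0]
  have : (e - yy * 4).toNat - (max (s - yy * 4) 0).toNat = 0 := by
    have h1 : (0:Int) ≤ max (s - yy * 4) 0 := le_max_right _ _
    omega
  rw [this]
  simp

lemma pvFlat_nil (s : Int) : pvFlat s s = [] := by
  unfold pvFlat
  rw [PySem.Int.floordiv_eq_ediv_of_pos (by omega), PySem.Int.floordiv_eq_ediv_of_pos (by omega)]
  by_cases h : (s + 3) / 4 = s / 4
  · rw [h, PySem.List.pyRange_one_eq_nil (le_refl _)]; rfl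
  · have hE : (s + 3) / 4 = s / 4 + 1 := by omega
    rw [hE, PySem.List.pyRange_one_cons (by omega), PySem.List.pyRange_one_eq_nil (by omega)]
    rw [List.flatMap_cons, List.flatMap_nil, List.append_nil]
    exact pvBlk_nil s s (s / 4) (by omega) (le_max_left _ _)

-- one element peels off the front of B's grouped output
lemma pvFlat_peel (s e : Int) (hlt : s < e) : pvFlat s e = pvF s :: pvFlat (s + 1) e := by
  have hd : PySem.Int.floordiv s 4 = s / 4 := PySem.Int.floordiv_eq_ediv_of_pos (by omega)
  have hm : PySem.Int.mod s 4 = s % 4 := PySem.Int.mod_eq_emod_of_pos (by omega)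
  have hd1 : PySem.Int.floordiv (s + 1) 4 = (s + 1) / 4 := PySem.Int.floordiv_eq_ediv_of_pos (by omega)
  have hE : PySem.Int.floordiv (e + 3) 4 = (e + 3) / 4 := PySem.Int.floordiv_eq_ediv_of_pos (by omega)
  have hY0E : s / 4 < (e + 3) / 4 := by omega
  have hrest : ∀ yy ∈ PySem.List.pyRange (s / 4 + 1) ((e + 3) / 4) 1,
      pvBlk s e yy = pvBlk (s + 1) e yy := by
    intro yy hyy
    rw [PySem.List.mem_pyRange_one] at hyy
    unfold pvBlk
    have h1 : max (s - yy * 4) 0 = 0 := max_eq_right (by omega)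
    have h2 : max (s + 1 - yy * 4) 0 = 0 := max_eq_right (by omega)
    rw [h1, h2]
  have hstop0 : (0:Int) ≤ e - s / 4 * 4 := by omega
  have hstop : s % 4 + 1 ≤ e - s / 4 * 4 := by omega
  by_cases hr3 : s % 4 = 3
  · -- last quarter of its year: the head year's block is exactly [pvF s], and the year list advances
    have hds1 : (s + 1) / 4 = s / 4 + 1 := by omega
    unfold pvFlat
    rw [hd, hd1, hE, hds1, PySem.List.pyRange_one_cons hY0E, List.flatMap_cons]
    have hblk : pvBlk s e (s / 4) = [pvF s] := by
      unfold pvBlk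
      have hlo : max (s - s / 4 * 4) 0 = 3 := by rw [max_eq_left (by omega)]; omega
      rw [hlo, PySem.List.slice_toNat _ (by omega) hstop0]
      obtain ⟨m, hmEq⟩ : ∃ m, (e - s / 4 * 4).toNat - (3:Int).toNat = m + 1 :=
        ⟨(e - s / 4 * 4).toNat - 4, by omega⟩
      rw [hmEq]
      show (((["Q4"] : List String).take (m + 1)).map _) = _
      simp only [List.take_succ_cons, List.take_nil, List.map_cons, List.map_nil]
      unfold pvF
      rw [hd, hm, hr3]
      rfl
    rw [hblk, List.flatMap_congr hrest]
    rfl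
  · -- the head year keeps more quarters: peel one element off its slice
    have hds1 : (s + 1) / 4 = s / 4 := by omega
    unfold pvFlat
    rw [hd, hd1, hE, hds1, PySem.List.pyRange_one_cons hY0E, List.flatMap_cons, List.flatMap_cons]
    have hblk : pvBlk s e (s / 4) = pvF s :: pvBlk (s + 1) e (s / 4) := by
      unfold pvBlk pvF
      have hlo : max (s - s / 4 * 4) 0 = s % 4 := by rw [max_eq_left (by omega)]; omega
      have hlo1 : max (s + 1 - s / 4 * 4) 0 = s % 4 + 1 := by rw [max_eq_left (by omega)]; omega
      rw [hlo, hlo1, hd, hm,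
          PySem.List.slice_toNat _ (by omega) hstop0,
          PySem.List.slice_toNat _ (by omega) hstop0]
      obtain ⟨m, hmEq⟩ : ∃ m, (e - s / 4 * 4).toNat - (s % 4).toNat = m + 1 :=
        ⟨(e - s / 4 * 4).toNat - (s % 4).toNat - 1, by omega⟩
      have hmEq1 : (e - s / 4 * 4).toNat - (s % 4 + 1).toNat = m := by omega
      rw [hmEq, hmEq1]
      have hcase : s % 4 = 0 ∨ s % 4 = 1 ∨ s % 4 = 2 := by omega
      rcases hcase with h | h | h <;> rw [h] <;>
        simp only [pvLabels, Int.toNat_zero, Int.toNat_one, List.drop, List.take_succ_cons,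
          List.map_cons, show ((1:Int)+1).toNat = 2 by rfl, show ((2:Int)+1).toNat = 3 by rfl,
          show ((2:Int)).toNat = 2 by rfl] <;> rfl
    rw [hblk, List.flatMap_congr hrest]
    rfl

lemma pvB_eq (N : Nat) : ∀ s : Int,
    pvFlat s (s + (N : Int)) = (List.range N).map (fun k : Nat => pvF (s + (k : Int))) := by
  induction N with
  | zero => intro s; simpa using pvFlat_nil s
  | succ n ih =>
    intro s
    have harg : s + ((n + 1 : Nat) : Int) = (s + 1) + (n : Int) := by push_cast; ring
    rw [harg]
    have hpeel := pvFlat_peel s ((s + 1) + (n : Int)) (by omega)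
    rw [hpeel, ih (s + 1), List.range_succ_eq_map, List.map_cons, List.map_map]
    have hhead : pvF (s + ((0 : Nat) : Int)) = pvF s := by norm_num
    have htail : (List.range n).map ((fun k : Nat => pvF (s + (k : Int))) ∘ Nat.succ)
        = (List.range n).map (fun k : Nat => pvF (s + 1 + (k : Int))) := by
      refine List.map_congr_left fun k _ => ?_
      have : s + ((Nat.succ k : Nat) : Int) = s + 1 + (k : Int) := by push_cast; ring
      simp only [Function.comp_apply, this]
    rw [hhead, htail]

-- for a negative window B's year loop emits only empty slices
lemma pvFlat_nil_of_le (s e : Int) (h : e ≤ s) : pvFlat s e = [] := by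
  unfold pvFlat
  have hcongr : ∀ yy ∈ PySem.List.pyRange (PySem.Int.floordiv s 4)
      (PySem.Int.floordiv (e + 3) 4) 1, pvBlk s e yy = (fun _ : Int => ([] : List (String × String))) yy := by
    intro yy hyy
    rw [PySem.List.mem_pyRange_one] at hyy
    rw [PySem.Int.floordiv_eq_ediv_of_pos (by omega), PySem.Int.floordiv_eq_ediv_of_pos (by omega)] at hyy
    have h1 : (0:Int) ≤ e - yy * 4 := by omega
    exact pvBlk_nil s e yy h1 (le_trans (by omega) (le_max_left (s - yy * 4) 0))
  rw [List.flatMap_congr hcongr]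
  simp

-- ===== VERDICT (by name: the statement is the Claim_ definition above) =====
theorem get_adjacent_quarters_py_spec : Claim_equal_get_adjacent_quarters_py := by
  intro year quarter window _ hpre
  obtain ⟨h1, h2⟩ := hpre
  obtain ⟨q_num, hq⟩ := Option.isSome_iff_exists.mp h1
  obtain ⟨year_int, hy⟩ := Option.isSome_iff_exists.mp h2
  unfold Spec_get_adjacent_quarters_py get_adjacent_quarters_py get_adjacent_quarters_py_alt
  rw [hq, hy]
  simp only []
  rw [pvA_eq_map (year_int * 4 + q_num - 1) window]
  rw [PySem.List.foldl_append_eq_flatMap, List.nil_append]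
  have hB : (PySem.List.pyRange (PySem.Int.floordiv (year_int * 4 + q_num - 1 - window) 4)
        (PySem.Int.floordiv (year_int * 4 + q_num - 1 - window + 2 * window + 1 + 3) 4) 1).flatMap
      (fun yy => (PySem.List.slice pvLabels
          (some (max (year_int * 4 + q_num - 1 - window - yy * 4) 0))
          (some (year_int * 4 + q_num - 1 - window + 2 * window + 1 - yy * 4))).map
          (fun lab => (PySem.Int.toStr yy, lab)))
      = pvFlat (year_int * 4 + q_num - 1 - window)
          (year_int * 4 + q_num - 1 - window + 2 * window + 1) := by
    unfold pvFlat pvBlk; rfl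
  rw [hB]
  by_cases hw : 0 ≤ window
  · have hN : year_int * 4 + q_num - 1 - window + 2 * window + 1
        = year_int * 4 + q_num - 1 - window + (((2 * window + 1).toNat : Nat) : Int) := by omega
    rw [hN, pvB_eq]
  · have hA : (2 * window + 1).toNat = 0 := by omega
    rw [hA, pvFlat_nil_of_le _ _ (by omega)]
    rfl
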